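-- pv_equiv track=rewrite | github.com/Data-Integration-Lilla-team/hw-8-Data_integration | Project/Schema matching/Matching/feature_engineering_columns.py | compute_type
-- ===== SOURCE A (Python) =====
-- def compute_type(val):
--     numero_perc=0
--     numero_rank=0
--     numero_doll_normal=0
--     numero_doll=0
--     numero_resto=0
--     for i in val:
--         if '_perc' in val:
--             numero_perc+=1
--
--         if 'rank_' in val:
--             numero_rank+=1
--
--         if 'doll_' in val:
--             if 'm' in val or 't' in val or 'b' in val:
--                 numero_doll_normal+=1
--             else:
--                 numero_doll+=1
--
--         else:
--             numero_resto+=1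
--
--     if numero_doll>=3:
--         return 3
--     elif numero_perc>=5:
--         return 1
--     elif numero_rank>=5:
--         return 2
--     elif numero_doll_normal:
--         return 4
--     else:
--         return 5
-- ===== SOURCE B (Python) =====
-- def compute_type(val):
--     # Each loop condition in A is independent of the loop variable, so every
--     # counter is either len(val) or 0; each threshold (>=3, >=5, nonzero) is
--     # automatically met because the matched substring has length 5 <= len(val).
--     if 'doll_' in val and not ('m' in val or 't' in val or 'b' in val):
--         return 3
--     if '_perc' in val:
--         return 1
--     if 'rank_' in val:
--         return 2
--     if 'doll_' in val:
--         return 4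
--     return 5
-- ===== Notes on version B (the rewrite author's own statement) =====
-- stated objective: faster
-- what changed: A's per-character loop re-tests the same substring conditions len(val) times and then thresholds the counters; B observes that each counter is either len(val) or 0 (and any matched 5-char pattern forces len(val)>=5), so it replaces loop+counters with a single chain of substring tests.
import Mathlib
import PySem

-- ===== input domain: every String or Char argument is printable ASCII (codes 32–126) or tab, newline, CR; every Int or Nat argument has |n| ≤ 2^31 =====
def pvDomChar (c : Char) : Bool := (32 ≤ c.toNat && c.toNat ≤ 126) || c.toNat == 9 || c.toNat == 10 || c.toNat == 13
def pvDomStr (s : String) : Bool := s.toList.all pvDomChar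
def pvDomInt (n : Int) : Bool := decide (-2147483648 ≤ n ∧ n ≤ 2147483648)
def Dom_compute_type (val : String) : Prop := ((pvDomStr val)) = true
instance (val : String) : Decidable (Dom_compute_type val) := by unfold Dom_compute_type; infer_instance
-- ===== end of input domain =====

-- B replaces A's per-character counting loop by a direct chain of substring tests (the loop
-- conditions never depend on the loop variable); return value equivalence is proved below.

-- ===== PORT A =====
-- one loop iteration of A (the char is ignored by A's body too)
def computeA_step (val : String) (acc : Int × Int × Int × Int × Int) (_ : Char) :
    Int × Int × Int × Int × Int :=
  let p := if PySem.Str.isIn "_perc" val then acc.1 + 1 else acc.1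
  let r := if PySem.Str.isIn "rank_" val then acc.2.1 + 1 else acc.2.1
  if PySem.Str.isIn "doll_" val then
    if PySem.Str.isIn "m" val || PySem.Str.isIn "t" val || PySem.Str.isIn "b" val then
      (p, r, acc.2.2.1 + 1, acc.2.2.2.1, acc.2.2.2.2)
    else
      (p, r, acc.2.2.1, acc.2.2.2.1 + 1, acc.2.2.2.2)
  else
    (p, r, acc.2.2.1, acc.2.2.2.1, acc.2.2.2.2 + 1)

def compute_type (val : String) : Int :=
  let st := val.toList.foldl (computeA_step val) (0, 0, 0, 0, 0)
  if st.2.2.2.1 ≥ 3 then 3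
  else if st.1 ≥ 5 then 1
  else if st.2.1 ≥ 5 then 2
  else if st.2.2.1 ≠ 0 then 4
  else 5

-- ===== PORT B =====
def compute_type_alt (val : String) : Int :=
  if PySem.Str.isIn "doll_" val &&
      !(PySem.Str.isIn "m" val || PySem.Str.isIn "t" val || PySem.Str.isIn "b" val) then 3
  else if PySem.Str.isIn "_perc" val then 1
  else if PySem.Str.isIn "rank_" val then 2
  else if PySem.Str.isIn "doll_" val then 4
  else 5

-- ===== PRECONDITION & SPEC =====
def Spec_compute_type (val : String) (out : Int) : Prop := out = compute_type_alt val
instance (val : String) (out : Int) : Decidable (Spec_compute_type val out) := by unfold Spec_compute_type; infer_instance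

-- ===== CLAIM (what is proved, stated in full; the proofs are below) =====
def Claim_equal_compute_type : Prop := ∀ (val : String), Dom_compute_type val → Spec_compute_type val (compute_type val)

-- ===== LEMMAS AND PROOFS =====

-- A's loop conditions never look at the loop variable, so the fold only counts characters.
theorem computeA_fold_eq (val : String) (cs : List Char) (p r dn d rest : Int) :
    cs.foldl (computeA_step val) (p, r, dn, d, rest) =
      (p + (if PySem.Str.isIn "_perc" val then (cs.length : Int) else 0),
       r + (if PySem.Str.isIn "rank_" val then (cs.length : Int) else 0),
       dn + (if PySem.Str.isIn "doll_" val ∧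
              (PySem.Str.isIn "m" val || PySem.Str.isIn "t" val || PySem.Str.isIn "b" val) = true
             then (cs.length : Int) else 0),
       d + (if PySem.Str.isIn "doll_" val ∧
              ¬ (PySem.Str.isIn "m" val || PySem.Str.isIn "t" val || PySem.Str.isIn "b" val) = true
            then (cs.length : Int) else 0),
       rest + (if PySem.Str.isIn "doll_" val then 0 else (cs.length : Int))) := by
  unfold computeA_step
  generalize PySem.Str.isIn "_perc" val = bp
  generalize PySem.Str.isIn "rank_" val = br
  generalize PySem.Str.isIn "doll_" val = bd
  generalize (PySem.Str.isIn "m" val || PySem.Str.isIn "t" val || PySem.Str.isIn "b" val) = bm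
  cases bp <;> cases br <;> cases bd <;> cases bm <;>
    (induction cs generalizing p r dn d rest with
     | nil => simp
     | cons c cs ih => simp_all; try omega)

-- a matched pattern of length 5 forces 5 ≤ len(val)
theorem len_ge_of_isIn (pat val : String) (h : PySem.Str.isIn pat val = true) :
    pat.toList.length ≤ val.toList.length := by
  have := (PySem.Str.isIn_iff_infix pat val).mp h
  exact this.length_le

-- ===== VERDICT (by name: the statement is the Claim_ definition above) =====
theorem compute_type_spec : Claim_equal_compute_type := by
  intro val _
  unfold Spec_compute_type compute_type compute_type_alt
  rw [computeA_fold_eq]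
  have Hp : PySem.Str.isIn "_perc" val = true → 5 ≤ val.toList.length := fun h => by
    have h1 := len_ge_of_isIn "_perc" val h
    have h2 : ("_perc".toList.length) = 5 := by decide
    omega
  have Hr : PySem.Str.isIn "rank_" val = true → 5 ≤ val.toList.length := fun h => by
    have h1 := len_ge_of_isIn "rank_" val h
    have h2 : ("rank_".toList.length) = 5 := by decide
    omega
  have Hd : PySem.Str.isIn "doll_" val = true → 5 ≤ val.toList.length := fun h => by
    have h1 := len_ge_of_isIn "doll_" val h
    have h2 : ("doll_".toList.length) = 5 := by decide
    omega
  generalize hbp : PySem.Str.isIn "_perc" val = bp at Hp ⊢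
  generalize hbr : PySem.Str.isIn "rank_" val = br at Hr ⊢
  generalize hbd : PySem.Str.isIn "doll_" val = bd at Hd ⊢
  generalize hbm : PySem.Str.isIn "m" val = bm
  generalize hbt : PySem.Str.isIn "t" val = bt
  generalize hbb : PySem.Str.isIn "b" val = bb
  generalize hn : val.toList.length = m at Hp Hr Hd ⊢
  cases bp <;> cases br <;> cases bd <;> cases bm <;> cases bt <;> cases bb <;>
    simp_all <;> omega
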